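-- pv_equiv track=rewrite | github.com/svigs/newsletter4ai | collector.py | assign_tiers
-- ===== SOURCE A (Python) =====
-- def assign_tiers(articles, feeds_config):
--     """Assign tier information based on source"""
--     tier_map = {}
--
--     # Build tier map from feeds.json structure
--     for tier_key, tier_data in feeds_config.items():
--         tier_letter = tier_key.replace('tier_', '')
--         if isinstance(tier_data, dict):
--             for source in tier_data.keys():
--                 tier_map[source] = tier_letter
--
--     for article in articles:
--         article['tier'] = tier_map.get(article['source'], 'unknown')
--
--     return articles
-- ===== SOURCE B (Python) =====
-- def assign_tiers(articles, feeds_config):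
--     """Assign tier information based on source (no precomputed tier map)"""
--     for article in articles:
--         source = article['source']
--         tier = 'unknown'
--         for tier_key, tier_data in feeds_config.items():
--             if isinstance(tier_data, dict) and source in tier_data:
--                 tier = tier_key.replace('tier_', '')
--         article['tier'] = tier
--     return articles
-- ===== Notes on version B (the rewrite author's own statement) =====
-- stated objective: simpler
-- what changed: Drops the precomputed tier_map dict entirely: each article scans feeds_config.items() directly, overwriting the label on every matching tier so the last match wins, mirroring A's dict-overwrite semantics.
import Mathlib
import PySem

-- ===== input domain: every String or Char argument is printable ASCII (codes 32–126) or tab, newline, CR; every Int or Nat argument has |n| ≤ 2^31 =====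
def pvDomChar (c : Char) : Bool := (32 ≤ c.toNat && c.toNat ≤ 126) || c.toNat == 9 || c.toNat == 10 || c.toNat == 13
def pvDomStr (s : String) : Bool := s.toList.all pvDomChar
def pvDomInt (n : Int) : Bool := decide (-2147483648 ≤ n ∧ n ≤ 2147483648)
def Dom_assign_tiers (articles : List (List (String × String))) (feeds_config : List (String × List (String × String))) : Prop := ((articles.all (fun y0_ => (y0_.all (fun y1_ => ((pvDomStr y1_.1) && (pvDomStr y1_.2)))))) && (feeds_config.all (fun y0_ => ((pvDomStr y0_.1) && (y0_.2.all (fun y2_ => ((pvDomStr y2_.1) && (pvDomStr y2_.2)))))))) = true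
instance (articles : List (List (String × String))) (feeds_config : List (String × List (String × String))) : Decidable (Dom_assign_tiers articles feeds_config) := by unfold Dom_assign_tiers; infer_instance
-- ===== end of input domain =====

-- B drops A's precomputed tier_map: each article scans the config tiers directly, last match wins.
-- Both A and B mutate the article dicts in place in Python (adding 'tier'); the equivalence proved is about the return value.

-- ===== PORT A =====
-- the dict view of an association list (Python dict(): duplicate keys collapse, last value wins, first position kept)
def assign_tiers (articles : List (List (String × String))) (feeds_config : List (String × List (String × String))) : List (List (String × String)) :=
  let tier_map : PySem.Dict String String :=
    (PySem.Dict.ofList feeds_config).items.foldl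
      (fun tm p =>
        let tier_letter := PySem.Str.replace p.1 "tier_" ""
        -- isinstance(tier_data, dict) is always true under the stated types
        (PySem.Dict.ofList p.2).keys.foldl (fun tm source => tm.insert source tier_letter) tm)
      PySem.Dict.empty
  articles.map (fun article =>
    let d := PySem.Dict.ofList article
    -- article['source'] raises KeyError when absent: excluded by Pre_; getD is the total form under Pre_
    (d.insert "tier" (tier_map.getD (d.getD "source" "") "unknown")).items)

-- ===== PORT B =====
def assign_tiers_alt (articles : List (List (String × String))) (feeds_config : List (String × List (String × String))) : List (List (String × String)) :=
  articles.map (fun article =>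
    let d := PySem.Dict.ofList article
    let source := d.getD "source" ""          -- total form of article['source'] under Pre_
    let tier := (PySem.Dict.ofList feeds_config).items.foldl
      (fun tier p => if (PySem.Dict.ofList p.2).contains source then PySem.Str.replace p.1 "tier_" "" else tier)
      "unknown"
    (d.insert "tier" tier).items)

-- ===== PRECONDITION & SPEC =====
-- Pre_ excludes exactly the inputs on which Python A raises KeyError: an article with no 'source' key (B raises there too).
def Pre_assign_tiers (articles : List (List (String × String))) (feeds_config : List (String × List (String × String))) : Prop :=
  ∀ article ∈ articles, "source" ∈ article.map Prod.fst
instance (articles : List (List (String × String))) (feeds_config : List (String × List (String × String))) : Decidable (Pre_assign_tiers articles feeds_config) := by unfold Pre_assign_tiers; infer_instance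

def pvWitness_assign_tiers : (List (List (String × String))) × (List (String × List (String × String))) :=
  ([[("source", "x")], [("source", "z"), ("title", "t")]], [("tier_a", [("x", "u")]), ("tier_b", [("x", "v")])])

def Spec_assign_tiers (articles : List (List (String × String))) (feeds_config : List (String × List (String × String))) (out : List (List (String × String))) : Prop := out = assign_tiers_alt articles feeds_config
instance (articles : List (List (String × String))) (feeds_config : List (String × List (String × String))) (out : List (List (String × String))) : Decidable (Spec_assign_tiers articles feeds_config out) := by unfold Spec_assign_tiers; infer_instance

-- ===== CLAIM (what is proved, stated in full; the proofs are below) =====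
def Claim_equal_assign_tiers : Prop := ∀ (articles : List (List (String × String))) (feeds_config : List (String × List (String × String))), Dom_assign_tiers articles feeds_config → Pre_assign_tiers articles feeds_config → Spec_assign_tiers articles feeds_config (assign_tiers articles feeds_config)

-- ===== LEMMAS AND PROOFS =====

-- inserting the same value v at every key of ks: the final lookup is v iff s ∈ ks
lemma getD_foldl_insert_const (ks : List String) (d : PySem.Dict String String) (s v u : String) :
    (ks.foldl (fun d k => d.insert k v) d).getD s u = if s ∈ ks then v else d.getD s u := by
  induction ks generalizing d with
  | nil => simp
  | cons k ks ih =>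
    simp only [List.foldl_cons, ih, PySem.Dict.getD_insert, List.mem_cons]
    by_cases hk : s = k <;> by_cases hm : s ∈ ks <;> simp [hk, hm]

-- the tier_map lookup equals B's direct scan over the tiers
lemma tier_map_getD_eq_scan (tiers : List (String × List (String × String)))
    (d : PySem.Dict String String) (s : String) (acc : String) (h : d.getD s "unknown" = acc) :
    (tiers.foldl
      (fun tm p =>
        let tier_letter := PySem.Str.replace p.1 "tier_" ""
        (PySem.Dict.ofList p.2).keys.foldl (fun tm source => tm.insert source tier_letter) tm)
      d).getD s "unknown"
    = tiers.foldl
        (fun tier p => if (PySem.Dict.ofList p.2).contains s then PySem.Str.replace p.1 "tier_" "" else tier)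
        acc := by
  induction tiers generalizing d acc with
  | nil => simpa using h
  | cons t ts ih =>
    simp only [List.foldl_cons]
    apply ih
    rw [getD_foldl_insert_const]
    by_cases hm : s ∈ (PySem.Dict.ofList t.2).keys
    · simp [hm, (PySem.Dict.contains_iff_mem_keys _ _).2 hm]
    · have hc : (PySem.Dict.ofList t.2).contains s = false := by
        by_contra hx
        exact hm ((PySem.Dict.contains_iff_mem_keys _ _).1 (by simpa using hx))
      simp [hm, hc, h]

-- ===== VERDICT (by name: the statement is the Claim_ definition above) =====
theorem assign_tiers_spec : Claim_equal_assign_tiers := by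
  intro articles feeds_config _dom _pre
  unfold Spec_assign_tiers assign_tiers assign_tiers_alt
  apply List.map_congr_left
  intro article _
  dsimp only
  congr 2
  exact tier_map_getD_eq_scan _ _ _ _ (PySem.Dict.getD_empty _ _)
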